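-- pv_equiv track=rewrite | github.com/lynever/prac_programmars | 프로그래머스/unrated/181918. 배열 만들기 4/배열 만들기 4.py | solution
-- ===== SOURCE A (Python) =====
-- def solution(arr):
--     stk, i = [], 0
--     while i < len(arr):
--         if len(stk) == 0:
--             stk.append(arr[i])
--             i += 1
--         elif stk[-1] < arr[i]:
--             stk.append(arr[i])
--             i += 1
--         else:
--             stk = stk[0:-1]
--     return stk
-- ===== SOURCE B (Python) =====
-- def solution(arr):
--     out = []
--     m = None
--     for x in reversed(arr):
--         if m is None or x < m:
--             out.append(x)
--             m = x
--     return out[::-1]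
-- ===== Notes on version B (the rewrite author's own statement) =====
-- stated objective: faster
-- what changed: Replaced the stack simulation entirely by a single right-to-left pass with a running minimum: an element survives iff it is strictly smaller than every later element, so B never builds or pops a stack.
import Mathlib
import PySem

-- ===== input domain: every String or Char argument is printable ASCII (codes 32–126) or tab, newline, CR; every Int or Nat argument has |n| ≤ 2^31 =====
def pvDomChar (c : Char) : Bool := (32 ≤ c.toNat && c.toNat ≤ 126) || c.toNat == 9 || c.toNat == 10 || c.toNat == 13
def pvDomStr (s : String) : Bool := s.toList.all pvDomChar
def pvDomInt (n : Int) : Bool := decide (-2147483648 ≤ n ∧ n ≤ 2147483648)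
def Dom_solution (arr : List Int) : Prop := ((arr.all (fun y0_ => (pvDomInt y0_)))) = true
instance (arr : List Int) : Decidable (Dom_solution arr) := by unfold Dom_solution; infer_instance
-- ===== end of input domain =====

-- B replaces A's stack simulation by one right-to-left pass with a running minimum
-- (an element survives iff it is strictly below every later element): a faster algorithm.

-- ===== PORT A =====
-- literal port of A's while loop: state (i, stk); the pop branch keeps i unchanged
def solutionLoop (arr : List Int) (i : Nat) (stk : List Int) : List Int :=
  if h : i < arr.length then
    if stk.isEmpty then
      solutionLoop arr (i + 1) (stk ++ [arr[i]])
    else if stk.getLast! < arr[i] then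
      solutionLoop arr (i + 1) (stk ++ [arr[i]])
    else
      solutionLoop arr i stk.dropLast
  else stk
termination_by 2 * (arr.length - i) + stk.length
decreasing_by
  · simp; omega
  · simp; omega
  · have hne : stk ≠ [] := by
      intro hnil; simp [hnil] at *
    have h1 : stk.dropLast.length = stk.length - 1 := List.length_dropLast
    have h2 : 0 < stk.length := List.length_pos_of_ne_nil hne
    omega

def solution (arr : List Int) : List Int := solutionLoop arr 0 []

-- ===== PORT B =====
-- for x in reversed(arr): keep x (and set m = x) iff m is None or x < m; return out[::-1]
def solution_alt (arr : List Int) : List Int :=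
  (arr.reverse.foldl
    (fun (st : List Int × Option Int) x =>
      match st.2 with
      | none => (st.1 ++ [x], some x)
      | some m => if x < m then (st.1 ++ [x], some x) else st)
    ([], none)).1.reverse

-- ===== PRECONDITION & SPEC =====
def Spec_solution (arr : List Int) (out : List Int) : Prop := out = solution_alt arr
instance (arr : List Int) (out : List Int) : Decidable (Spec_solution arr out) := by unfold Spec_solution; infer_instance

-- ===== CLAIM (what is proved, stated in full; the proofs are below) =====
def Claim_equal_solution : Prop := ∀ (arr : List Int), Dom_solution arr → Spec_solution arr (solution arr)

-- ===== LEMMAS AND PROOFS =====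

-- specification function: keep exactly the elements strictly below all later elements
def keep : List Int → List Int
  | [] => []
  | x :: xs => if xs.all (fun y => decide (x < y)) then x :: keep xs else keep xs

-- proof-side model of A's pop phase: drop trailing elements ≥ x
def popGE (stk : List Int) (x : Int) : List Int :=
  if h : stk ≠ [] ∧ x ≤ stk.getLast! then popGE stk.dropLast x else stk
termination_by stk.length
decreasing_by
  have h1 : stk.dropLast.length = stk.length - 1 := List.length_dropLast
  have h2 : 0 < stk.length := List.length_pos_of_ne_nil h.1
  omega

theorem drop_eq_get_cons {α : Type} (l : List α) (i : Nat) (h : i < l.length) :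
    l.drop i = l[i] :: l.drop (i + 1) := by
  exact List.drop_eq_getElem_cons h

-- A's while loop is the left fold of (pop then push) over the remaining elements
theorem loop_eq_fold (arr : List Int) (i : Nat) (stk : List Int) :
    solutionLoop arr i stk = (arr.drop i).foldl (fun s x => popGE s x ++ [x]) stk := by
  fun_induction solutionLoop arr i stk with
  | case1 i stk h hemp ih =>
      have hnil : stk = [] := List.isEmpty_iff.mp hemp
      rw [drop_eq_get_cons arr i h, List.foldl_cons]
      have hpop : popGE stk arr[i] = stk := by
        rw [popGE, dif_neg]; simp [hnil]
      rw [hpop, ih]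
  | case2 i stk h hemp hlt ih =>
      rw [drop_eq_get_cons arr i h, List.foldl_cons]
      have hpop : popGE stk arr[i] = stk := by
        rw [popGE, dif_neg]
        intro ⟨_, hle⟩; omega
      rw [hpop, ih]
  | case3 i stk h hemp hge ih =>
      have hne : stk ≠ [] := by
        intro hnil; simp [hnil] at hemp
      rw [ih, drop_eq_get_cons arr i h, List.foldl_cons, List.foldl_cons]
      have hpop : popGE stk arr[i] = popGE stk.dropLast arr[i] := by
        conv_lhs => rw [popGE]
        rw [dif_pos ⟨hne, not_lt.mp hge⟩]
      rw [hpop]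
  | case4 i stk h =>
      rw [List.drop_eq_nil_of_le (by omega), List.foldl_nil]

theorem keep_subset {xs : List Int} {y : Int} (h : y ∈ keep xs) : y ∈ xs := by
  induction xs with
  | nil => simpa [keep] using h
  | cons a l ih =>
      rw [keep] at h
      split at h
      · rcases List.mem_cons.mp h with h | h
        · simp [h]
        · exact List.mem_cons_of_mem _ (ih h)
      · exact List.mem_cons_of_mem _ (ih h)

theorem keep_pairwise (xs : List Int) : (keep xs).Pairwise (· < ·) := by
  induction xs with
  | nil => simp [keep]
  | cons a l ih =>
      rw [keep]
      split
      · rename_i hall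
        refine List.pairwise_cons.mpr ⟨fun y hy => ?_, ih⟩
        have hmem := keep_subset hy
        simpa using List.all_eq_true.mp hall y hmem
      · exact ih

theorem popGE_nil (x : Int) : popGE [] x = [] := by
  rw [popGE, dif_neg]; simp

theorem getLast!_concat (ys : List Int) (a : Int) : (ys ++ [a]).getLast! = a := by
  induction ys with
  | nil => rfl
  | cons b l ih => simp [List.getLast!] at *

theorem popGE_concat_lt (ys : List Int) (a x : Int) (h : a < x) :
    popGE (ys ++ [a]) x = ys ++ [a] := by
  rw [popGE, dif_neg]
  intro ⟨_, hle⟩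
  rw [getLast!_concat] at hle
  omega

theorem popGE_concat_ge (ys : List Int) (a x : Int) (h : x ≤ a) :
    popGE (ys ++ [a]) x = popGE ys x := by
  rw [popGE, dif_pos]
  · rw [List.dropLast_concat]
  · exact ⟨by simp, by rw [getLast!_concat]; exact h⟩

theorem popGE_eq_filter (stk : List Int) (x : Int) (hs : stk.Pairwise (· < ·)) :
    popGE stk x = stk.filter (fun y => decide (y < x)) := by
  induction stk using List.reverseRecOn with
  | nil => simp [popGE_nil]
  | append_singleton ys a ih =>
      have hys : ys.Pairwise (· < ·) := (List.pairwise_append.mp hs).1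
      have hlt : ∀ y ∈ ys, y < a := by
        intro y hy
        exact (List.pairwise_append.mp hs).2.2 y hy a (by simp)
      by_cases hax : a < x
      · rw [popGE_concat_lt ys a x hax]
        rw [List.filter_append]
        have h1 : ys.filter (fun y => decide (y < x)) = ys :=
          List.filter_eq_self.mpr (fun y hy => by
            have := hlt y hy; simp; omega)
        simp [h1, hax]
      · rw [popGE_concat_ge ys a x (by omega), ih hys, List.filter_append]
        simp [hax]

theorem keep_concat (l : List Int) (x : Int) :
    keep (l ++ [x]) = (keep l).filter (fun y => decide (y < x)) ++ [x] := by
  induction l with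
  | nil => simp [keep]
  | cons a l ih =>
      rw [List.cons_append, keep, keep, ih]
      by_cases hall : l.all (fun y => decide (a < y)) = true
      · by_cases hax : a < x
        · have : (l ++ [x]).all (fun y => decide (a < y)) = true := by
            simp [List.all_append, hall, hax]
          simp [this, hall, List.filter_cons, hax]
        · have : (l ++ [x]).all (fun y => decide (a < y)) = false := by
            simp [List.all_append]; intro _; omega
          simp [this, hall, List.filter_cons, hax]
      · have : (l ++ [x]).all (fun y => decide (a < y)) = false := by
          simp [List.all_append]
          intro h; exact absurd (by simpa using h) (by simpa using hall)
        simp [this, hall]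

theorem fold_eq_keep (arr : List Int) :
    arr.foldl (fun s x => popGE s x ++ [x]) [] = keep arr := by
  induction arr using List.reverseRecOn with
  | nil => simp [keep]
  | append_singleton l x ih =>
      rw [List.foldl_append, List.foldl_cons, List.foldl_nil, ih,
        popGE_eq_filter _ _ (keep_pairwise l), keep_concat]

-- minimum as B maintains it
def minOf : List Int → Option Int
  | [] => none
  | a :: l => some ((minOf l).elim a (min a))

theorem minOf_le {l : List Int} {m : Int} (h : minOf l = some m) :
    ∀ y ∈ l, m ≤ y := by
  induction l generalizing m with
  | nil => simp [minOf] at h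
  | cons a l ih =>
      intro y hy
      rw [minOf] at h
      cases hml : minOf l with
      | none =>
          rw [hml] at h
          have hl : l = [] := by
            cases l with
            | nil => rfl
            | cons b l' => simp [minOf] at hml
          simp at h
          rcases List.mem_cons.mp hy with h' | h'
          · omega
          · rw [hl] at h'; simp at h'
      | some m' =>
          rw [hml] at h; simp at h
          rcases List.mem_cons.mp hy with h' | h'
          · subst h'; omega
          · have := ih hml y h'; omega

theorem minOf_mem {l : List Int} {m : Int} (h : minOf l = some m) : m ∈ l := by
  induction l generalizing m with
  | nil => simp [minOf] at h
  | cons a l ih =>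
      rw [minOf] at h
      cases hml : minOf l with
      | none => rw [hml] at h; simp at h; simp [h]
      | some m' =>
          rw [hml] at h; simp at h
          rcases min_cases a m' with ⟨he, _⟩ | ⟨he, _⟩
          · simp [← h, he]
          · exact List.mem_cons_of_mem _ (by rw [← h, he]; exact ih hml)

-- B's reverse fold computes (keep l reversed, min of l)
theorem alt_inv (l : List Int) :
    l.reverse.foldl
      (fun (st : List Int × Option Int) x =>
        match st.2 with
        | none => (st.1 ++ [x], some x)
        | some m => if x < m then (st.1 ++ [x], some x) else st)
      ([], none) = ((keep l).reverse, minOf l) := by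
  induction l with
  | nil => simp [keep, minOf]
  | cons a l ih =>
      rw [List.reverse_cons, List.foldl_append, ih, List.foldl_cons, List.foldl_nil]
      cases hml : minOf l with
      | none =>
          have hl : l = [] := by
            cases l with
            | nil => rfl
            | cons b l' => simp [minOf] at hml
          subst hl
          simp [keep, minOf]
      | some m =>
          simp only
          by_cases ham : a < m
          · have hall : l.all (fun y => decide (a < y)) = true := by
              simp; intro y hy
              have := minOf_le hml y hy; omega
            have hmin : minOf (a :: l) = some a := by
              rw [minOf, hml]; simp; omega
            simp [ham, keep, hall, hmin]
          · have hall : l.all (fun y => decide (a < y)) = false := by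
              simp
              exact ⟨m, minOf_mem hml, by omega⟩
            have hmin : minOf (a :: l) = some m := by
              rw [minOf, hml]; simp; omega
            simp [ham, keep, hall, hmin]

-- ===== VERDICT (by name: the statement is the Claim_ definition above) =====
theorem solution_spec : Claim_equal_solution := by
  intro arr _
  unfold Spec_solution solution solution_alt
  rw [alt_inv]
  simp only [List.reverse_reverse]
  rw [loop_eq_fold]
  simpa using fold_eq_keep arr
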